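-- pv_equiv track=rewrite | github.com/w772552092/DataMiningCompetitionCode | data_process.py | is_mostly_fifty
-- ===== SOURCE A (Python) =====
-- def is_mostly_fifty(L_):
--     # 去掉列表中0或者超过200的值
--     filtered_list = [x for x in L_ if x != 0 and x <= 200]
--     # 将50到60之间的值视为50
--     normalized_list = [50 if 50 <= x <= 60 else x for x in filtered_list]
--     # 统计50的数量
--     count_50 = normalized_list.count(50)
--
--     # 如果50的数量超过列表长度的一半，返回1，否则返回0
--     if count_50 > len(normalized_list) / 2:
--         return 1  # 代表是待机
--     else:
--         return 0
-- ===== SOURCE B (Python) =====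
-- def is_mostly_fifty(L_):
--     # Majority by signed ballot: every kept value (nonzero, <=200) casts a vote,
--     # +1 if it normalizes to 50 (i.e. lies between 50 and 60 inclusive), -1 otherwise.
--     # "count > total/2" holds exactly when the ballot is positive.
--     bal = 0
--     for x in L_:
--         if x != 0 and x <= 200:
--             bal += 1 if 50 <= x <= 60 else -1
--     return 1 if bal > 0 else 0
-- ===== Notes on version B (the rewrite author's own statement) =====
-- stated objective: alternative
-- what changed: Replaces A's staged pipeline (filter list, normalization list, .count, compare count with len/2) by a signed-ballot majority test: a single running tally gets +1 per kept value between 50 and 60 inclusive and -1 per other kept value, and the answer is 1 iff the tally is positive; no lists, counts or lengths are built.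
import Mathlib
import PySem

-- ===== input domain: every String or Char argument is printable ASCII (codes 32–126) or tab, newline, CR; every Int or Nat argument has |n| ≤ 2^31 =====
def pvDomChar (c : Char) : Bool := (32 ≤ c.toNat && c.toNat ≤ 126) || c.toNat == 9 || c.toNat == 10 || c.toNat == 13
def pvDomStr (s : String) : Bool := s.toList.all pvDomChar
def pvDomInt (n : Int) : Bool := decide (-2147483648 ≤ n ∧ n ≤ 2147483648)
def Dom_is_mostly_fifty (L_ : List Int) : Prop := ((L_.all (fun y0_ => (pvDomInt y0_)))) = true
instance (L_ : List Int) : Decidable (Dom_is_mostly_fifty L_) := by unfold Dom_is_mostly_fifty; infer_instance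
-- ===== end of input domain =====

-- ===== PORT A =====
-- B replaces A's filter/normalize/count pipeline by a signed-ballot majority tally (objective: alternative).
def is_mostly_fifty (L_ : List Int) : Int :=
  let filtered_list := L_.filter (fun x => x != 0 && x ≤ 200)
  let normalized_list := filtered_list.map (fun x => if 50 ≤ x ∧ x ≤ 60 then (50 : Int) else x)
  let count_50 := PySem.List.count normalized_list 50
  -- Python compares count_50 > len/2 with float '/'; for these ints this is exactly 2*count_50 > len
  if 2 * (count_50 : Int) > (normalized_list.length : Int) then 1 else 0

-- ===== PORT B =====
def is_mostly_fifty_alt (L_ : List Int) : Int :=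
  let bal := L_.foldl (fun (bal : Int) x =>
    if x ≠ 0 ∧ x ≤ 200 then bal + (if 50 ≤ x ∧ x ≤ 60 then 1 else -1) else bal) 0
  if bal > 0 then 1 else 0

-- ===== PRECONDITION & SPEC =====
def Spec_is_mostly_fifty (L_ : List Int) (out : Int) : Prop := out = is_mostly_fifty_alt L_
instance (L_ : List Int) (out : Int) : Decidable (Spec_is_mostly_fifty L_ out) := by unfold Spec_is_mostly_fifty; infer_instance

-- ===== CLAIM (what is proved, stated in full; the proofs are below) =====
def Claim_equal_is_mostly_fifty : Prop := ∀ (L_ : List Int), Dom_is_mostly_fifty L_ → Spec_is_mostly_fifty L_ (is_mostly_fifty L_)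

-- ===== LEMMAS AND PROOFS =====

-- ===== VERDICT (by name: the statement is the Claim_ definition above) =====
def pvVote : Int → Int → Int := fun bal x =>
  if x ≠ 0 ∧ x ≤ 200 then bal + (if 50 ≤ x ∧ x ≤ 60 then 1 else -1) else bal

-- the ballot equals (count of 50 in A's normalized list) minus (the other kept values), shifted by the start state
theorem pvBal_inv (L_ : List Int) (b : Int) :
    L_.foldl pvVote b =
      b + 2 * (PySem.List.count ((L_.filter (fun x => x != 0 && x ≤ 200)).map
              (fun x => if 50 ≤ x ∧ x ≤ 60 then (50 : Int) else x)) 50 : Int)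
        - ((L_.filter (fun x => x != 0 && x ≤ 200)).length : Int) := by
  induction L_ generalizing b with
  | nil => simp [PySem.List.count_eq]
  | cons x xs ih =>
      simp only [List.foldl_cons, List.filter_cons, pvVote]
      by_cases h1 : x ≠ 0 ∧ x ≤ 200
      · have hb : (x != 0 && decide (x ≤ 200)) = true := by simp [h1.1, h1.2]
        rw [if_pos h1, hb, if_pos rfl]
        by_cases h2 : 50 ≤ x ∧ x ≤ 60
        · rw [if_pos h2, ih]
          simp [PySem.List.count_eq, h2]
          omega
        · have hx50 : ¬ ((if 50 ≤ x ∧ x ≤ 60 then (50:Int) else x) = 50) := by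
            rw [if_neg h2]; intro h; exact h2 (by omega)
          rw [if_neg h2, ih]
          simp [PySem.List.count_eq, List.count_cons, if_neg hx50]
          omega
      · have hb : (x != 0 && decide (x ≤ 200)) = false := by
          rcases not_and_or.mp h1 with h | h
          · simp at h; simp [h]
          · simp at h; simp; omega
        rw [if_neg h1, hb, if_neg (by simp), ih]

-- ===== VERDICT (by name: the statement is the Claim_ definition above) =====
theorem is_mostly_fifty_spec : Claim_equal_is_mostly_fifty := by
  intro L_ _
  unfold Spec_is_mostly_fifty is_mostly_fifty is_mostly_fifty_alt
  have h := pvBal_inv L_ 0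
  simp only [show (fun (bal : Int) x =>
      if x ≠ 0 ∧ x ≤ 200 then bal + (if 50 ≤ x ∧ x ≤ 60 then 1 else -1) else bal) = pvVote from rfl, h, List.length_map]
  split_ifs with h1 h2 h2 <;> first | rfl | omega
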